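-- pv_equiv track=rewrite | github.com/deepanshumehtaa/LeetCode-Premium | 2sum_smaller.py | two_ptr
-- ===== SOURCE A (Python) =====
-- def two_ptr(nums: list, target: int) -> int:
--     nums = sorted(nums)
--     n = len(nums)
--     right = n - 1
--     ans = 0
--     for i in range(n):
--         t = target - nums[i]
--         left = i + 1
--         right = n - 1
--         while left < right:
--             temp = nums[left] + nums[right]
--             if temp < t:
--                 ans += right - left
--                 left += 1
--             elif temp >= t:
--                 right -= 1
--     return ans
-- ===== SOURCE B (Python) =====
-- def two_ptr(nums: list, target: int) -> int:
--     # Count all index triples i < j < k with nums[i] + nums[j] + nums[k] < target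
--     # by direct brute-force enumeration (the count is permutation-invariant, so no sort).
--     n = len(nums)
--     ans = 0
--     for i in range(n):
--         for j in range(i + 1, n):
--             for k in range(j + 1, n):
--                 if nums[i] + nums[j] + nums[k] < target:
--                     ans += 1
--     return ans
-- ===== Notes on version B (the rewrite author's own statement) =====
-- stated objective: simpler
-- what changed: B drops the sort and the per-element two-pointer sweep and counts all index triples i<j<k with nums[i]+nums[j]+nums[k] < target with three plain nested range loops (the count is permutation-invariant), trading speed for the obvious brute-force algorithm.
import Mathlib
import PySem

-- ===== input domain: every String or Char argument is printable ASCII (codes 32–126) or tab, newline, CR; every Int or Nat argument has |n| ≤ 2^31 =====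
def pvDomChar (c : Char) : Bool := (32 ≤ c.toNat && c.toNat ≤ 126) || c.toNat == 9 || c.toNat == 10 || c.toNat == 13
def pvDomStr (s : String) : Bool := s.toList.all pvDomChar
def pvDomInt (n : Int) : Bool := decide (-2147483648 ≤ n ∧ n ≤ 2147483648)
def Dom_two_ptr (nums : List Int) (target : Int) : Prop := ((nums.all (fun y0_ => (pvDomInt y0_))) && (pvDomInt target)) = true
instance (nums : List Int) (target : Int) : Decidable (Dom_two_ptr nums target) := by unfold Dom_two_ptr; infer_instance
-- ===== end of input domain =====

-- B replaces sort + per-element two-pointer sweep with plain brute-force enumeration of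
-- all index triples i<j<k (objective: simpler; the count is permutation-invariant).

-- ===== PORT A =====
-- inner `while left < right` loop; nums[left]/nums[right] are always in range when read
-- (0 ≤ left < right < n), so pyGetD with default 0 is exact here
def tpLoop (s : List Int) (t : Int) (left right ans : Int) : Int :=
  if left < right then
    let temp := PySem.List.pyGetD s left 0 + PySem.List.pyGetD s right 0
    if temp < t then tpLoop s t (left + 1) right (ans + (right - left))
    else tpLoop s t left (right - 1) ans
  else ans
termination_by (right - left).toNat
decreasing_by all_goals omega

def two_ptr (nums : List Int) (target : Int) : Int :=
  let s := PySem.List.sorted nums (fun x => x) false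
  let n : Int := s.length
  (PySem.List.pyRange 0 n 1).foldl (fun ans i =>
    let t := target - PySem.List.pyGetD s i 0
    tpLoop s t (i + 1) (n - 1) ans) 0

-- ===== PORT B =====
-- three nested `for` loops over index ranges; all indices are in range, pyGetD default 0 is exact
def two_ptr_alt (nums : List Int) (target : Int) : Int :=
  let n : Int := nums.length
  (PySem.List.pyRange 0 n 1).foldl (fun ans i =>
    (PySem.List.pyRange (i + 1) n 1).foldl (fun ans j =>
      (PySem.List.pyRange (j + 1) n 1).foldl (fun ans k =>
        if PySem.List.pyGetD nums i 0 + PySem.List.pyGetD nums j 0 + PySem.List.pyGetD nums k 0 < target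
        then ans + 1 else ans) ans) ans) 0

-- ===== PRECONDITION & SPEC =====
def Spec_two_ptr (nums : List Int) (target : Int) (out : Int) : Prop := out = two_ptr_alt nums target
instance (nums : List Int) (target : Int) (out : Int) : Decidable (Spec_two_ptr nums target out) := by unfold Spec_two_ptr; infer_instance

-- ===== CLAIM (what is proved, stated in full; the proofs are below) =====
def Claim_equal_two_ptr : Prop := ∀ (nums : List Int) (target : Int), Dom_two_ptr nums target → Spec_two_ptr nums target (two_ptr nums target)

-- ===== LEMMAS AND PROOFS =====

-- reference counters: c1 t l = #elements < t; c2 t l = #pairs i<j with sum < t; c3 = triples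
def c1 (t : Int) (l : List Int) : Int := (l.countP (fun z => decide (z < t)) : Nat)

def c2 (t : Int) : List Int → Int
  | [] => 0
  | x :: xs => c1 (t - x) xs + c2 t xs

def c3 (t : Int) : List Int → Int
  | [] => 0
  | x :: xs => c2 (t - x) xs + c3 t xs

-- ---- B equals c3 ----
lemma count_foldl (c target : Int) (l : List Int) (ans : Int) :
    l.foldl (fun a z => if c + z < target then a + 1 else a) ans = ans + c1 (target - c) l := by
  induction l generalizing ans with
  | nil => simp [c1]
  | cons z zs ih =>
    simp only [List.foldl_cons]
    rw [ih]
    by_cases h : z < target - c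
    · have h' : c + z < target := by omega
      simp [c1, h, h']; omega
    · have h' : ¬ (c + z < target) := by omega
      simp [c1, h, h']

-- generic suffix loop: a fold over range(a, n) of `ans + g nums[j] (suffix after j)`
-- accumulates G of the suffix from a, for any G with G [] = 0, G (x::xs) = g x xs + G xs
lemma foldl_suffix (nums : List Int) (g : Int → List Int → Int) (G : List Int → Int)
    (h0 : G [] = 0) (hc : ∀ x xs, G (x :: xs) = g x xs + G xs) :
    ∀ (m : Nat) (a : Int), 0 ≤ a → ((nums.length : Int) - a).toNat = m → ∀ ans : Int,
      (PySem.List.pyRange a (nums.length : Int) 1).foldl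
        (fun ans j => ans + g (PySem.List.pyGetD nums j 0) (nums.drop (j + 1).toNat)) ans
      = ans + G (nums.drop a.toNat) := by
  intro m
  induction m with
  | zero =>
    intro a ha hm ans
    rw [PySem.List.pyRange_one_eq_nil (by omega)]
    have : nums.drop a.toNat = [] := List.drop_eq_nil_of_le (by omega)
    simp [this, h0]
  | succ m ih =>
    intro a ha hm ans
    have hlt : a < (nums.length : Int) := by omega
    rw [PySem.List.pyRange_one_cons hlt, List.foldl_cons]
    rw [ih (a + 1) (by omega) (by omega)]
    have hget : PySem.List.pyGetD nums a 0 = nums[a.toNat]'(by omega) :=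
      PySem.List.pyGetD_eq_getElem nums 0 ha hlt
    have hdrop : nums.drop a.toNat = nums[a.toNat]'(by omega) :: nums.drop (a.toNat + 1) :=
      List.drop_eq_getElem_cons (by omega)
    have h1 : (a + 1).toNat = a.toNat + 1 := by omega
    rw [hget, h1, hdrop, hc]
    omega

-- innermost loop counts remaining elements z with c + z < target
lemma alt_inner (nums : List Int) (c target j : Int) (hj : 0 ≤ j) (ans : Int) :
    (PySem.List.pyRange (j + 1) (nums.length : Int) 1).foldl
      (fun a k => if c + PySem.List.pyGetD nums k 0 < target then a + 1 else a) ans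
    = ans + c1 (target - c) (nums.drop (j + 1).toNat) := by
  rw [PySem.List.foldl_pyRange_pyGetD' nums 0
    (fun a z => if c + z < target then a + 1 else a) ans (by omega)]
  exact count_foldl c target _ ans

lemma alt_eq_c3 (nums : List Int) (target : Int) : two_ptr_alt nums target = c3 target nums := by
  simp only [two_ptr_alt]
  rw [PySem.List.foldl_congr_mem _ _
    (fun ans i => ans + c2 (target - PySem.List.pyGetD nums i 0) (nums.drop (i + 1).toNat)) 0 ?_]
  · have := foldl_suffix nums (fun x xs => c2 (target - x) xs) (c3 target) rfl
      (fun x xs => rfl) nums.length 0 le_rfl (by omega) 0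
    simpa using this
  · intro ans i hi
    have hi0 : 0 ≤ i := (PySem.List.mem_pyRange_one.mp hi).1
    rw [PySem.List.foldl_congr_mem _ _
      (fun ans j => ans + c1 (target - (PySem.List.pyGetD nums i 0 + PySem.List.pyGetD nums j 0))
        (nums.drop (j + 1).toNat)) ans ?_]
    · have := foldl_suffix nums
        (fun x xs => c1 (target - PySem.List.pyGetD nums i 0 - x) xs)
        (c2 (target - PySem.List.pyGetD nums i 0)) rfl (fun x xs => rfl)
        ((nums.length : Int) - (i + 1)).toNat (i + 1) (by omega) (by omega) ans
      rw [PySem.List.foldl_congr_mem _ _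
        (fun ans j => ans + c1 (target - PySem.List.pyGetD nums i 0 - PySem.List.pyGetD nums j 0)
          (nums.drop (j + 1).toNat)) ans ?_]
      · exact this
      · intro a j _
        have : target - (PySem.List.pyGetD nums i 0 + PySem.List.pyGetD nums j 0)
            = target - PySem.List.pyGetD nums i 0 - PySem.List.pyGetD nums j 0 := by ring
        rw [this]
    · intro a j hj
      have hj0 : 0 ≤ j := by
        have := (PySem.List.mem_pyRange_one.mp hj).1; omega
      exact alt_inner nums (PySem.List.pyGetD nums i 0 + PySem.List.pyGetD nums j 0) target j hj0 a

-- ---- c1/c2/c3 are permutation invariant ----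
lemma c1_perm (t : Int) {l l' : List Int} (h : l.Perm l') : c1 t l = c1 t l' := by
  simp [c1, h.countP_eq]

lemma c1_cons (t z : Int) (l : List Int) :
    c1 t (z :: l) = c1 t l + (if z < t then 1 else 0) := by
  by_cases h : z < t <;> simp [c1, h]

lemma c2_perm (t : Int) {l l' : List Int} (h : l.Perm l') : c2 t l = c2 t l' := by
  induction h generalizing t with
  | nil => rfl
  | cons x h ih => simp [c2, ih, c1_perm _ h]
  | swap x y l => simp only [c2, c1_cons]; split_ifs <;> omega
  | trans h1 h2 ih1 ih2 => rw [ih1, ih2]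

lemma c3_perm (t : Int) {l l' : List Int} (h : l.Perm l') : c3 t l = c3 t l' := by
  induction h generalizing t with
  | nil => rfl
  | cons x h ih => simp [c3, ih, c2_perm _ h]
  | swap x y l =>
    simp only [c3, c2]
    have hxy : t - y - x = t - x - y := by ring
    rw [hxy]
    omega
  | trans h1 h2 ih1 ih2 => rw [ih1, ih2]

-- ---- two-pointer on a sorted window equals c2 ----
-- every element of a sorted list is ≤ its last element
lemma le_of_sorted_getLast? {l : List Int} (hs : l.Pairwise (· ≤ ·)) {y : Int}
    (hy : l.getLast? = some y) {z : Int} (hz : z ∈ l) : z ≤ y := by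
  obtain ⟨l', rfl⟩ := List.getLast?_eq_some_iff.mp hy
  rcases List.mem_append.mp hz with h | h
  · exact (List.pairwise_append.mp hs).2.2 z h y (by simp)
  · simp at h; omega

lemma c1_append_singleton (t z : Int) (l : List Int) :
    c1 t (l ++ [z]) = c1 t l + (if z < t then 1 else 0) := by
  by_cases h : z < t <;> simp [c1, List.countP_append, h]

lemma c2_small (t : Int) {l : List Int} (h : l.length ≤ 1) : c2 t l = 0 := by
  match l, h with
  | [], _ => rfl
  | [x], _ => simp [c2, c1]

-- when (head) + last < t, every element is below the threshold
lemma c1_all (t : Int) {l : List Int} (hs : l.Pairwise (· ≤ ·)) {y : Int}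
    (hy : l.getLast? = some y) (h : y < t) : c1 t l = l.length := by
  simp only [c1]
  rw [List.countP_eq_length.mpr]
  intro z hz
  exact decide_eq_true (lt_of_le_of_lt (le_of_sorted_getLast? hs hy hz) h)

-- dropping the last element loses no pair when head + last ≥ t (sorted list)
lemma c2_dropLast (t : Int) : ∀ (l : List Int), l.Pairwise (· ≤ ·) → 2 ≤ l.length →
    ∀ x y : Int, l.head? = some x → l.getLast? = some y → t ≤ x + y →
    c2 t l = c2 t l.dropLast := by
  intro l
  induction l with
  | nil => simp
  | cons a xs ih =>
    intro hs h2 x y hx hy hge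
    have hax : a = x := by simpa using hx
    have hxs : xs ≠ [] := by cases xs <;> simp_all
    have hy' : xs.getLast? = some y := by
      obtain ⟨b, l', rfl⟩ := List.exists_cons_of_ne_nil hxs
      rwa [List.getLast?_cons_cons] at hy
    have hyL : xs.getLast hxs = y := by
      rw [List.getLast?_eq_some_getLast hxs] at hy'
      simpa using hy'
    rw [List.dropLast_cons_of_ne_nil hxs]
    simp only [c2]
    have hdx : xs = xs.dropLast ++ [y] := by
      conv_lhs => rw [← List.dropLast_append_getLast hxs]
      rw [hyL]
    have h1 : c1 (t - a) xs = c1 (t - a) xs.dropLast := by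
      conv_lhs => rw [hdx]
      rw [c1_append_singleton]
      have : ¬ (y < t - a) := by omega
      simp [this]
    have h2' : c2 t xs = c2 t xs.dropLast := by
      by_cases hlen : xs.length ≤ 1
      · have hd : xs.dropLast = [] := by
          cases xs with
          | nil => rfl
          | cons b l => cases l with
            | nil => rfl
            | cons c l' => simp at hlen
        rw [hd, c2_small t hlen]; rfl
      · obtain ⟨b, l', rfl⟩ := List.exists_cons_of_ne_nil hxs
        apply ih (List.pairwise_cons.mp hs).2 (by omega) b y rfl hy'
        have hb : a ≤ b := List.rel_of_pairwise_cons hs (by simp)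
        omega
    rw [h1, h2']

-- the window of s between Int indices L and R (inclusive)
def win (s : List Int) (L R : Int) : List Int := (s.drop L.toNat).take (R + 1 - L).toNat

lemma win_length (s : List Int) (L R : Int) (h0 : 0 ≤ L) (hLR : L ≤ R) (hR : R < s.length) :
    (win s L R).length = (R + 1 - L).toNat := by
  simp [win]; omega

lemma win_head? (s : List Int) (L R : Int) (h0 : 0 ≤ L) (hLR : L ≤ R) (hR : R < s.length) :
    (win s L R).head? = some (s[L.toNat]'(by omega)) := by
  rw [List.head?_eq_getElem?]
  simp only [win]
  rw [List.getElem?_take_of_lt (by omega), List.getElem?_drop]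
  rw [List.getElem?_eq_getElem (by omega)]
  simp

lemma win_last? (s : List Int) (L R : Int) (h0 : 0 ≤ L) (hLR : L ≤ R) (hR : R < s.length) :
    (win s L R).getLast? = some (s[R.toNat]'(by omega)) := by
  rw [List.getLast?_eq_getElem?]
  rw [win_length s L R h0 hLR hR]
  simp only [win]
  rw [List.getElem?_take_of_lt (by omega), List.getElem?_drop]
  rw [List.getElem?_eq_getElem (by omega)]
  congr 1
  congr 1
  omega

lemma win_tail (s : List Int) (L R : Int) (h0 : 0 ≤ L) (hLR : L < R) :
    win s (L + 1) R = (win s L R).tail := by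
  simp only [win, ← List.drop_one, List.drop_take]
  rw [List.drop_drop]
  congr 1
  · show (R + 1 - (L + 1)).toNat = (R + 1 - L).toNat - 1
    omega
  · show s.drop (L + 1).toNat = s.drop (L.toNat + 1)
    congr 1
    omega

lemma win_dropLast (s : List Int) (L R : Int) (h0 : 0 ≤ L) (hR : R < s.length) :
    win s L (R - 1) = (win s L R).dropLast := by
  simp only [win]
  rw [List.dropLast_eq_take, List.take_take, List.length_take]
  congr 1
  simp
  omega

lemma win_sorted {s : List Int} (hs : s.Pairwise (· ≤ ·)) (L R : Int) :
    (win s L R).Pairwise (· ≤ ·) :=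
  List.Pairwise.sublist ((List.take_sublist _ _).trans (List.drop_sublist _ _)) hs

lemma tpLoop_eq (s : List Int) (hs : s.Pairwise (· ≤ ·)) (t : Int) :
    ∀ (k : Nat) (L R : Int), (R - L).toNat = k → 0 ≤ L → R < s.length → ∀ ans,
      tpLoop s t L R ans = ans + c2 t (win s L R) := by
  intro k
  induction k with
  | zero =>
    intro L R hk h0 hR ans
    rw [tpLoop]
    have hnl : ¬ L < R := by omega
    simp only [if_neg hnl]
    have : (win s L R).length ≤ 1 := by
      simp only [win, List.length_take, List.length_drop]
      omega
    rw [c2_small t this]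
    omega
  | succ k ih =>
    intro L R hk h0 hR ans
    have hLR : L < R := by omega
    have hgL : PySem.List.pyGetD s L 0 = s[L.toNat]'(by omega) :=
      PySem.List.pyGetD_eq_getElem s 0 h0 (by omega)
    have hgR : PySem.List.pyGetD s R 0 = s[R.toNat]'(by omega) :=
      PySem.List.pyGetD_eq_getElem s 0 (by omega) hR
    have hhead := win_head? s L R h0 (le_of_lt hLR) hR
    have hlast := win_last? s L R h0 (le_of_lt hLR) hR
    obtain ⟨x, xs, hwin⟩ : ∃ x xs, win s L R = x :: xs := by
      cases hw : win s L R with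
      | nil =>
        exfalso
        rw [hw] at hhead
        simp at hhead
      | cons a l => exact ⟨a, l, rfl⟩
    have hx : x = s[L.toNat]'(by omega) := by
      rw [hwin] at hhead; simpa using hhead
    have hxs : xs ≠ [] := by
      have := win_length s L R h0 (le_of_lt hLR) hR
      rw [hwin] at this
      intro h; rw [h] at this; simp at this; omega
    have hxl : xs.getLast? = some (s[R.toNat]'(by omega)) := by
      rw [hwin] at hlast
      obtain ⟨b, l', rfl⟩ := List.exists_cons_of_ne_nil hxs
      rwa [List.getLast?_cons_cons] at hlast
    have hsw : (x :: xs).Pairwise (· ≤ ·) := by rw [← hwin]; exact win_sorted hs L R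
    rw [tpLoop]
    simp only [if_pos hLR, hgL, hgR]
    by_cases hc : s[L.toNat]'(by omega) + s[R.toNat]'(by omega) < t
    · rw [if_pos hc]
      rw [ih (L + 1) R (by omega) (by omega) hR]
      rw [win_tail s L R h0 hLR, hwin]
      simp only [List.tail_cons, c2]
      have hlen : xs.length = (R - L).toNat := by
        have := win_length s L R h0 (le_of_lt hLR) hR
        rw [hwin] at this; simp at this; omega
      have hc1 : c1 (t - x) xs = xs.length := by
        apply c1_all (t - x) (List.pairwise_cons.mp hsw).2 hxl
        omega
      rw [hc1, hlen]
      omega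
    · rw [if_neg hc]
      rw [ih L (R - 1) (by omega) h0 (by omega)]
      rw [win_dropLast s L R h0 hR]
      congr 1
      symm
      apply c2_dropLast t (win s L R) (win_sorted hs L R)
        (by rw [win_length s L R h0 (le_of_lt hLR) hR]; omega)
        (s[L.toNat]'(by omega)) (s[R.toNat]'(by omega)) hhead hlast (by omega)

-- the full suffix window
lemma win_suffix (s : List Int) (i : Nat) (hi : i < s.length) :
    win s ((i : Int) + 1) ((s.length : Int) - 1) = s.drop (i + 1) := by
  simp only [win]
  have h1 : (((i : Int) + 1)).toNat = i + 1 := by omega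
  rw [h1]
  apply List.take_of_length_le
  simp
  omega

-- sum of suffix pair-counts is c3
lemma sum_c2_eq_c3 (t : Int) : ∀ (s : List Int),
    ((List.range s.length).map (fun i => c2 (t - s.getD i 0) (s.drop (i + 1)))).sum
      = c3 t s := by
  intro s
  induction s with
  | nil => simp [c3]
  | cons x xs ih =>
    rw [List.length_cons, List.range_succ_eq_map]
    simp only [List.map_cons, List.map_map, List.sum_cons]
    have : ((List.range xs.length).map
        ((fun i => c2 (t - (x :: xs).getD i 0) ((x :: xs).drop (i + 1))) ∘ Nat.succ)).sum
        = ((List.range xs.length).map (fun i => c2 (t - xs.getD i 0) (xs.drop (i + 1)))).sum := by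
      apply congrArg
      apply List.map_congr_left
      intro i _
      simp [Function.comp]
    rw [this, ih]
    simp [c3]

lemma two_ptr_eq_c3_sorted (nums : List Int) (target : Int) :
    two_ptr nums target = c3 target (PySem.List.sorted nums (fun x => x) false) := by
  simp only [two_ptr]
  set s := PySem.List.sorted nums (fun x => x) false with hsdef
  have hs : s.Pairwise (· ≤ ·) := by
    have := PySem.List.sorted_pairwise nums (fun x => x)
    simpa using this
  rw [PySem.List.pyRange_zero_natCast, List.foldl_map]
  rw [PySem.List.foldl_congr_mem _ _
    (fun ans (i : Nat) => ans + c2 (target - s.getD i 0) (s.drop (i + 1))) 0 ?_]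
  · rw [PySem.List.foldl_add]
    rw [sum_c2_eq_c3]
    simp
  · intro ans i hi
    have hi' : i < s.length := List.mem_range.mp hi
    rw [tpLoop_eq s hs (target - PySem.List.pyGetD s (i : Int) 0)
      (((s.length : Int) - 1) - ((i : Int) + 1)).toNat ((i : Int) + 1) ((s.length : Int) - 1)
      rfl (by omega) (by omega) ans]
    rw [win_suffix s i hi']
    rw [PySem.List.pyGetD_natCast]

-- ===== VERDICT (by name: the statement is the Claim_ definition above) =====
theorem two_ptr_spec : Claim_equal_two_ptr := by
  intro nums target _
  unfold Spec_two_ptr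
  rw [alt_eq_c3, two_ptr_eq_c3_sorted]
  exact c3_perm target (PySem.List.sorted_perm nums (fun x => x) false)
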